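-- pv_equiv track=rewrite | github.com/krastykovyaz/yandex_train | prefix_count_seq.py | count_cuts
-- ===== SOURCE A (Python) =====
-- def count_cuts(arr):
--     pref = 0
--     pref_dict  = {0:1}
--     for i in range(1, len(arr)):
--         pref += arr[i - 1]
--         if pref not in pref_dict:
--             pref_dict[pref] = 0
--         pref_dict[pref] += 1
--     count_range = 0
--     for k in pref_dict:
--         count_rows = pref_dict[k]
--         count_range += count_rows * (count_rows - 1) // 2
--     return count_range
-- ===== SOURCE B (Python) =====
-- def count_cuts(arr):
--     total = 0
--     pref = 0
--     counts = {0: 1}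
--     for x in arr[:-1]:
--         pref += x
--         c = counts.get(pref, 0)
--         total += c
--         counts[pref] = c + 1
--     return total
-- ===== Notes on version B (the rewrite author's own statement) =====
-- stated objective: simpler
-- what changed: B folds the pair count into the single prefix-sum pass (add the stored count of the current prefix before incrementing it), eliminating A's second loop and the C(n,2) combination step.
import Mathlib
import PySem

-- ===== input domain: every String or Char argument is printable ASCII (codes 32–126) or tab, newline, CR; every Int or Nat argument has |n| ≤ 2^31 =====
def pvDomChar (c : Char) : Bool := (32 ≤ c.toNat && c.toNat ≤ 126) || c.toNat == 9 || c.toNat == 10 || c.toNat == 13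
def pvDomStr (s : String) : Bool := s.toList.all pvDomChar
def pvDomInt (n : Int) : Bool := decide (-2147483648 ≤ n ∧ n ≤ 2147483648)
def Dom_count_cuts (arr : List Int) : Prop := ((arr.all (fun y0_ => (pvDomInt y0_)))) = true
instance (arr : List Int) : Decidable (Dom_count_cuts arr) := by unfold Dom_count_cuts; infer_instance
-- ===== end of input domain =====

-- B fuses the pair counting into the single prefix-sum pass (add the stored count of the
-- current prefix before incrementing it), removing A's second loop over the dict and the
-- C(c,2) combination step (objective: simpler).

-- ===== PORT A =====
def count_cuts (arr : List Int) : Int :=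
  let st := (PySem.List.pyRange 1 (arr.length : Int)).foldl
    (fun (s : Int × PySem.Dict Int Int) i =>
      let pref := s.1 + PySem.List.pyGetD arr (i - 1) 0   -- index i-1 is always in range
      let d := if s.2.contains pref = false then s.2.insert pref 0 else s.2
      (pref, d.insert pref (d.getD pref 0 + 1)))
    (0, PySem.Dict.ofList [((0 : Int), (1 : Int))])
  st.2.keys.foldl
    (fun acc k =>
      let count_rows := st.2.getD k 0   -- k is a key of the dict, so the default is never used
      acc + PySem.Int.floordiv (count_rows * (count_rows - 1)) 2)
    0

-- ===== PORT B =====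
def count_cuts_alt (arr : List Int) : Int :=
  let st := (PySem.List.slice arr none (some (-1))).foldl
    (fun (s : Int × Int × PySem.Dict Int Int) x =>
      let pref := s.2.1 + x
      let c := s.2.2.getD pref 0
      (s.1 + c, pref, s.2.2.insert pref (c + 1)))
    (0, 0, PySem.Dict.ofList [((0 : Int), (1 : Int))])
  st.1

-- ===== PRECONDITION & SPEC =====
def Spec_count_cuts (arr : List Int) (out : Int) : Prop := out = count_cuts_alt arr
instance (arr : List Int) (out : Int) : Decidable (Spec_count_cuts arr out) := by unfold Spec_count_cuts; infer_instance

-- ===== CLAIM (what is proved, stated in full; the proofs are below) =====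
def Claim_equal_count_cuts : Prop := ∀ (arr : List Int), Dom_count_cuts arr → Spec_count_cuts arr (count_cuts arr)

-- ===== LEMMAS AND PROOFS =====

-- the counter update both loops perform on the dict
def pvUpd (d : PySem.Dict Int Int) (x : Int) : PySem.Dict Int Int := d.insert x (d.getD x 0 + 1)

-- the list of running prefix sums produced from start value p
def pvPrefs (p : Int) : List Int → List Int
  | [] => []
  | x :: ys => (p + x) :: pvPrefs (p + x) ys

def pvC2 (c : Int) : Int := PySem.Int.floordiv (c * (c - 1)) 2

-- sum of C(count,2) over the distinct values of L
def pvSC (L : List Int) : Int :=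
  ((PySem.Set.ofList L).map (fun k => pvC2 ((L.count k : Int)))).sum

lemma pv_getD_of_not_contains (d : PySem.Dict Int Int) (x : Int)
    (h : d.contains x = false) : d.getD x 0 = 0 := by
  unfold PySem.Dict.getD
  rw [(PySem.Dict.get?_eq_none_iff_contains d x).mpr h]
  rfl

lemma pv_upd_eq (d : PySem.Dict Int Int) (x : Int) :
    (if d.contains x = false then d.insert x 0 else d).insert x
      ((if d.contains x = false then d.insert x 0 else d).getD x 0 + 1) = pvUpd d x := by
  by_cases h : d.contains x = false
  · simp only [h, if_pos, pvUpd, PySem.Dict.getD_insert_self d x 0 0,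
      PySem.Dict.insert_insert_self, pv_getD_of_not_contains d x h]
  · simp only [h, pvUpd]
    simp

lemma pvC2_succ (c : Int) : pvC2 (c + 1) = pvC2 c + c := by
  obtain ⟨m, hm⟩ : ∃ m, c * (c - 1) = 2 * m := by
    rcases Int.even_or_odd c with ⟨k, hk⟩ | ⟨k, hk⟩
    · exact ⟨k * (c - 1), by rw [hk]; ring⟩
    · exact ⟨c * k, by rw [hk]; ring⟩
  have h1 : pvC2 c = m := by
    unfold pvC2
    rw [PySem.Int.floordiv_eq_iff_of_pos (by norm_num), hm]
    omega
  have h2 : pvC2 (c + 1) = m + c := by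
    unfold pvC2
    rw [PySem.Int.floordiv_eq_iff_of_pos (by norm_num)]
    have : (c + 1) * (c + 1 - 1) = 2 * (m + c) := by linear_combination hm
    rw [this]; omega
  rw [h1, h2]

lemma pv_sum_map_update (c : Int) : ∀ (s : List Int), s.Nodup → ∀ (x : Int), x ∈ s →
    ∀ (f g : Int → Int), (∀ k ∈ s, k ≠ x → f k = g k) → f x = g x + c →
    (s.map f).sum = (s.map g).sum + c := by
  intro s
  induction s with
  | nil => intro _ x hx; exact absurd hx (List.not_mem_nil)
  | cons a t ih =>
    intro hnd x hx f g hfg hfx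
    rcases List.mem_cons.mp hx with rfl | hxt
    · have ht : ∀ k ∈ t, f k = g k := by
        intro k hk
        exact hfg k (List.mem_cons_of_mem _ hk) (fun he => (List.nodup_cons.mp hnd).1 (he ▸ hk))
      simp only [List.map_cons, List.sum_cons, hfx, List.map_congr_left ht]
      ring
    · have ha : f a = g a := by
        refine hfg a (List.mem_cons_self) (fun he => ?_)
        exact (List.nodup_cons.mp hnd).1 (he ▸ hxt)
      simp only [List.map_cons, List.sum_cons, ha,
        ih (List.nodup_cons.mp hnd).2 x hxt f g
          (fun k hk hne => hfg k (List.mem_cons_of_mem _ hk) hne) hfx]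
      ring

lemma pv_ofList_append_singleton (M : List Int) (x : Int) :
    PySem.Set.ofList (M ++ [x]) = PySem.Set.add (PySem.Set.ofList M) x := by
  rw [PySem.Set.ofList_eq_foldl, PySem.Set.ofList_eq_foldl, List.foldl_append]
  rfl

lemma pvSC_append_singleton (M : List Int) (x : Int) :
    pvSC (M ++ [x]) = pvSC M + (M.count x : Int) := by
  by_cases hx : x ∈ M
  · have hset : PySem.Set.ofList (M ++ [x]) = PySem.Set.ofList M := by
      rw [pv_ofList_append_singleton]
      simp [PySem.Set.add, PySem.Set.contains, (PySem.Set.mem_ofList M x).mpr hx]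
    unfold pvSC
    rw [hset]
    refine pv_sum_map_update _ _ (PySem.Set.nodup_ofList M) x
      ((PySem.Set.mem_ofList M x).mpr hx) _ _ ?_ ?_
    · intro k _ hne
      simp [List.count_append, List.count_cons, if_neg (Ne.symm hne)]
    · have : (M ++ [x]).count x = M.count x + 1 := by
        simp [List.count_append]
      rw [this]
      push_cast
      rw [pvC2_succ]
  · have hset : PySem.Set.ofList (M ++ [x]) = PySem.Set.ofList M ++ [x] := by
      rw [pv_ofList_append_singleton]
      simp only [PySem.Set.add, PySem.Set.contains]
      have : ¬ x ∈ PySem.Set.ofList M := fun h => hx ((PySem.Set.mem_ofList M x).mp h)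
      simp [this]
    have hcnt0 : M.count x = 0 := List.count_eq_zero.mpr hx
    unfold pvSC
    rw [hset, List.map_append, List.sum_append]
    have hpt : ∀ k ∈ PySem.Set.ofList M,
        pvC2 (((M ++ [x]).count k : Int)) = pvC2 ((M.count k : Int)) := by
      intro k hk
      have hk' : k ∈ M := (PySem.Set.mem_ofList M k).mp hk
      have hne : k ≠ x := fun he => hx (he ▸ hk')
      simp [List.count_append, List.count_cons, if_neg (Ne.symm hne)]
    rw [List.map_congr_left hpt]
    have hx1 : (M ++ [x]).count x = 1 := by
      simp [List.count_append, hcnt0]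
    simp [hcnt0]
    decide

lemma pv_counter_append_singleton (M : List Int) (x : Int) :
    PySem.Dict.counter (M ++ [x])
      = (PySem.Dict.counter M).insert x ((PySem.Dict.counter M).getD x 0 + 1) := by
  rw [← PySem.Dict.foldl_insert_getD_add_one_eq_counter,
      ← PySem.Dict.foldl_insert_getD_add_one_eq_counter, List.foldl_append]
  simp

lemma pv_foldl_pyRange_shift {β : Type} (f : β → Int → β) : ∀ (n : Nat) (a : Int) (init : β),
    (PySem.List.pyRange (a + 1) (a + 1 + (n : Int))).foldl f init
      = (PySem.List.pyRange a (a + (n : Int))).foldl (fun s j => f s (j + 1)) init := by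
  intro n
  induction n with
  | zero =>
    intro a init
    rw [PySem.List.pyRange_one_eq_nil (by omega), PySem.List.pyRange_one_eq_nil (by omega)]
    rfl
  | succ n ih =>
    intro a init
    push_cast
    rw [PySem.List.pyRange_one_cons (show a + 1 < a + 1 + ((n : Int) + 1) by omega),
        PySem.List.pyRange_one_cons (show a < a + ((n : Int) + 1) by omega)]
    simp only [List.foldl_cons]
    have e1 : a + 1 + ((n : Int) + 1) = (a + 1) + 1 + (n : Int) := by ring
    have e2 : a + ((n : Int) + 1) = (a + 1) + (n : Int) := by ring
    rw [e1, e2]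
    exact ih (a + 1) (f init (a + 1))

lemma pv_foldl_body (ys : List Int) : ∀ (p : Int) (d : PySem.Dict Int Int),
    ys.foldl (fun s x => (s.1 + x, pvUpd s.2 (s.1 + x))) (p, d)
      = (p + ys.sum, (pvPrefs p ys).foldl pvUpd d) := by
  induction ys with
  | nil => intro p d; simp [pvPrefs]
  | cons x t ih =>
    intro p d
    simp only [List.foldl_cons, pvPrefs, ih (p + x), List.sum_cons]
    exact Prod.ext (by ring) rfl

lemma pv_dictA (L : List Int) :
    L.foldl pvUpd (PySem.Dict.ofList [((0 : Int), (1 : Int))]) = PySem.Dict.counter ((0 : Int) :: L) := by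
  rw [← PySem.Dict.foldl_insert_getD_add_one_eq_counter, List.foldl_cons]
  have hseed : PySem.Dict.empty.insert (0 : Int) (PySem.Dict.empty.getD (0 : Int) 0 + 1)
      = PySem.Dict.ofList [((0 : Int), (1 : Int))] := by decide
  rw [hseed]
  rfl

lemma pv_foldB (ys : List Int) : ∀ (M : List Int) (t p : Int),
    ys.foldl
      (fun (s : Int × Int × PySem.Dict Int Int) x =>
        let pref := s.2.1 + x
        let c := s.2.2.getD pref 0
        (s.1 + c, pref, s.2.2.insert pref (c + 1)))
      (t, p, PySem.Dict.counter M)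
      = (t + (pvSC (M ++ pvPrefs p ys) - pvSC M), p + ys.sum, PySem.Dict.counter (M ++ pvPrefs p ys)) := by
  induction ys with
  | nil => intro M t p; simp [pvPrefs]
  | cons x t ih =>
    intro M tt p
    simp only [List.foldl_cons, pvPrefs]
    rw [show (PySem.Dict.counter M).insert (p + x) ((PySem.Dict.counter M).getD (p + x) 0 + 1)
          = PySem.Dict.counter (M ++ [p + x]) from (pv_counter_append_singleton M (p + x)).symm]
    rw [ih (M ++ [p + x])]
    have hL : (M ++ [p + x]) ++ pvPrefs (p + x) t = M ++ ((p + x) :: pvPrefs (p + x) t) := by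
      simp
    rw [hL]
    refine Prod.ext ?_ (Prod.ext (by simp [List.sum_cons]; ring) rfl)
    simp only
    rw [PySem.Dict.getD_counter, pvSC_append_singleton]
    ring

lemma pv_B_eq (arr : List Int) :
    count_cuts_alt arr = pvSC ((0 : Int) :: pvPrefs 0 arr.dropLast) - pvSC [0] := by
  unfold count_cuts_alt
  rw [PySem.List.slice_to_neg_one]
  rw [show PySem.Dict.ofList [((0 : Int), (1 : Int))] = PySem.Dict.counter [(0 : Int)] by decide]
  rw [pv_foldB arr.dropLast [0] 0 0]
  simp

lemma pv_A_eq (arr : List Int) (h : arr ≠ []) :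
    count_cuts arr = pvSC ((0 : Int) :: pvPrefs 0 arr.dropLast) := by
  unfold count_cuts
  have hbody : (fun (s : Int × PySem.Dict Int Int) i =>
      let pref := s.1 + PySem.List.pyGetD arr (i - 1) 0
      let d := if s.2.contains pref = false then s.2.insert pref 0 else s.2
      (pref, d.insert pref (d.getD pref 0 + 1)))
      = fun (s : Int × PySem.Dict Int Int) i =>
          (s.1 + PySem.List.pyGetD arr (i - 1) 0, pvUpd s.2 (s.1 + PySem.List.pyGetD arr (i - 1) 0)) := by
    funext s i
    exact Prod.ext rfl (pv_upd_eq s.2 (s.1 + PySem.List.pyGetD arr (i - 1) 0))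
  rw [hbody]
  have hlen : 1 ≤ arr.length := List.length_pos_iff.mpr h
  have hm : (arr.length : Int) = 1 + ((arr.length - 1 : Nat) : Int) := by
    push_cast [Nat.cast_sub hlen]; ring
  have hshift := pv_foldl_pyRange_shift
    (fun (s : Int × PySem.Dict Int Int) i =>
      (s.1 + PySem.List.pyGetD arr (i - 1) 0, pvUpd s.2 (s.1 + PySem.List.pyGetD arr (i - 1) 0)))
    (arr.length - 1) 0 ((0 : Int), PySem.Dict.ofList [((0 : Int), (1 : Int))])
  simp only [zero_add] at hshift
  rw [hm, hshift]
  have hcongr : ∀ (s : Int × PySem.Dict Int Int), ∀ j ∈ PySem.List.pyRange 0 ((arr.length - 1 : Nat) : Int),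
      (s.1 + PySem.List.pyGetD arr (j + 1 - 1) 0, pvUpd s.2 (s.1 + PySem.List.pyGetD arr (j + 1 - 1) 0))
        = (s.1 + PySem.List.pyGetD arr.dropLast j 0, pvUpd s.2 (s.1 + PySem.List.pyGetD arr.dropLast j 0)) := by
    intro s j hj
    have hj' := PySem.List.mem_pyRange_one.mp hj
    have h0 : (0 : Int) ≤ j := hj'.1
    have h1' : j < (arr.dropLast.length : Int) := by
      rw [List.length_dropLast]; exact hj'.2
    have h2 : j < (arr.length : Int) := by omega
    have he : j + 1 - 1 = j := by ring
    rw [he, PySem.List.pyGetD_eq_getElem arr 0 h0 h2,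
        PySem.List.pyGetD_eq_getElem arr.dropLast 0 h0 h1',
        List.getElem_dropLast]
  rw [PySem.List.foldl_congr_mem _ _ _ _ hcongr]
  rw [show ((arr.length - 1 : Nat) : Int) = (arr.dropLast.length : Int) by rw [List.length_dropLast]]
  rw [PySem.List.foldl_pyRange_zero_pyGetD' arr.dropLast 0
        (fun (s : Int × PySem.Dict Int Int) x => (s.1 + x, pvUpd s.2 (s.1 + x)))
        ((0 : Int), PySem.Dict.ofList [((0 : Int), (1 : Int))])]
  rw [pv_foldl_body]
  simp only [pv_dictA]
  rw [PySem.List.foldl_add ((PySem.Dict.counter ((0 : Int) :: pvPrefs 0 arr.dropLast)).keys)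
        (fun k => PySem.Int.floordiv
          ((PySem.Dict.counter ((0 : Int) :: pvPrefs 0 arr.dropLast)).getD k 0
            * ((PySem.Dict.counter ((0 : Int) :: pvPrefs 0 arr.dropLast)).getD k 0 - 1)) 2) 0]
  rw [PySem.Dict.keys_counter]
  unfold pvSC
  rw [zero_add]
  refine congrArg List.sum (List.map_congr_left ?_)
  intro k _
  rw [PySem.Dict.getD_counter]
  rfl

-- ===== VERDICT (by name: the statement is the Claim_ definition above) =====
theorem count_cuts_spec : Claim_equal_count_cuts := by
  intro arr _
  unfold Spec_count_cuts
  by_cases h : arr = []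
  · subst h; decide
  · rw [pv_A_eq arr h, pv_B_eq arr]
    rw [show pvSC [0] = 0 by decide]
    ring
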